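-- pv_equiv track=rewrite | github.com/microsoft/malmo | Malmo/samples/Python_examples/craft_work.py | checkInventoryForStewIngredients
-- ===== SOURCE A (Python) =====
-- from builtins import range
--
-- def checkInventoryForStewIngredients(obs):
--     # Need a bowl, a cooked rabbit, a carrot, a mushroom and a baked potato.
--     required=["cooked_rabbit", "baked_potato", "bowl", "carrot", "brown_mushroom"]
--     for i in range(0,39):
--         key = 'InventorySlot_'+str(i)+'_item'
--         if key in obs:
--             item = obs[key]
--             if item in required:
--                 required.remove(item)
--             if item == 'rabbit_stew':
--                 return False    # Already have the stew.
--     return len(required) == 0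
-- ===== SOURCE B (Python) =====
-- def checkInventoryForStewIngredients(obs):
--     # Collect the distinct items present in slots 0..38, then evaluate a closed-form predicate.
--     items = set()
--     for i in range(0, 39):
--         key = 'InventorySlot_' + str(i) + '_item'
--         if key in obs:
--             items.add(obs[key])
--     required = ["cooked_rabbit", "baked_potato", "bowl", "carrot", "brown_mushroom"]
--     return 'rabbit_stew' not in items and all(r in items for r in required)
-- ===== Notes on version B (the rewrite author's own statement) =====
-- stated objective: simpler
-- what changed: Replaces the single mutating pass (required.remove with an early return False) by a collect-then-evaluate shape: one pass gathers the distinct slot items into a set, then a closed-form predicate checks no rabbit_stew and all required items present.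
import Mathlib
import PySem

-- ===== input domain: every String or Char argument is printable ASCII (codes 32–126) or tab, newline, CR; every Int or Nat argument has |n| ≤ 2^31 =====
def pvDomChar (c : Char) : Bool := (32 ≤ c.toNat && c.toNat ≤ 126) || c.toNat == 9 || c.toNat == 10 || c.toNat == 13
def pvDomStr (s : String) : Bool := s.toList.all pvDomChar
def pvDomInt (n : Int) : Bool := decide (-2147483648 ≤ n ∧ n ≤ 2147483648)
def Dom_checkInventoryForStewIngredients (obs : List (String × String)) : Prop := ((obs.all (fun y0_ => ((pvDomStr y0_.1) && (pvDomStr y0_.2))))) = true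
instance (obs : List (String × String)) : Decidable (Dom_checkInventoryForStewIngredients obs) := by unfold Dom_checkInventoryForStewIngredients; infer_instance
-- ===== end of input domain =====

-- B replaces A's mutating single pass (required.remove + early return False) by a collect-into-a-set pass followed by a closed-form predicate; objective: simpler.

-- ===== PORT A =====
-- A's loop over the slot indices, carrying the mutable 'required' list
def pvChkLoopA (d : PySem.Dict String String) : List Int → List String → Bool
  | [], req => req.length == 0
  | i :: rest, req =>
      let key := "InventorySlot_" ++ PySem.Int.toStr i ++ "_item"
      match d.get? key with
      | none => pvChkLoopA d rest req
      | some item =>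
          let req' := if req.contains item then (PySem.List.remove? req item).getD req else req
          if item == "rabbit_stew" then false else pvChkLoopA d rest req'

def checkInventoryForStewIngredients (obs : List (String × String)) : Bool :=
  pvChkLoopA (PySem.Dict.mk obs) (PySem.List.pyRange 0 39 1)
    ["cooked_rabbit", "baked_potato", "bowl", "carrot", "brown_mushroom"]

-- ===== PORT B =====
-- B's first phase: collect the distinct items present in the slots into a set
def pvCollect (d : PySem.Dict String String) (idxs : List Int) : PySem.Set String :=
  idxs.foldl (fun s i =>
    let key := "InventorySlot_" ++ PySem.Int.toStr i ++ "_item"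
    match d.get? key with
    | some item => PySem.Set.add s item
    | none => s) PySem.Set.empty

def checkInventoryForStewIngredients_alt (obs : List (String × String)) : Bool :=
  let items := pvCollect (PySem.Dict.mk obs) (PySem.List.pyRange 0 39 1)
  !(PySem.Set.contains items "rabbit_stew") &&
    (["cooked_rabbit", "baked_potato", "bowl", "carrot", "brown_mushroom"].all
      (fun r => PySem.Set.contains items r))

-- ===== PRECONDITION & SPEC =====
def Spec_checkInventoryForStewIngredients (obs : List (String × String)) (out : Bool) : Prop := out = checkInventoryForStewIngredients_alt obs
instance (obs : List (String × String)) (out : Bool) : Decidable (Spec_checkInventoryForStewIngredients obs out) := by unfold Spec_checkInventoryForStewIngredients; infer_instance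

-- ===== CLAIM (what is proved, stated in full; the proofs are below) =====
def Claim_equal_checkInventoryForStewIngredients : Prop := ∀ (obs : List (String × String)), Dom_checkInventoryForStewIngredients obs → Spec_checkInventoryForStewIngredients obs (checkInventoryForStewIngredients obs)

-- ===== LEMMAS AND PROOFS =====

-- the value looked up for slot i
def pvVal (d : PySem.Dict String String) (i : Int) : Option String :=
  d.get? ("InventorySlot_" ++ PySem.Int.toStr i ++ "_item")

-- characterisation of A's loop: false iff some scanned slot holds rabbit_stew,
-- else the remaining (distinct) 'required' entries must each occur among the scanned slots
lemma pvChkLoopA_char (d : PySem.Dict String String) :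
    ∀ (idxs : List Int) (req : List String), req.Nodup →
      pvChkLoopA d idxs req =
        (decide (∀ i ∈ idxs, pvVal d i ≠ some "rabbit_stew") &&
         decide (∀ r ∈ req, ∃ i ∈ idxs, pvVal d i = some r)) := by
  intro idxs
  induction idxs with
  | nil =>
      intro req _
      cases req with
      | nil => simp [pvChkLoopA]
      | cons a as =>
          simp only [pvChkLoopA]
          simp
          exact ⟨a, fun h => absurd rfl h⟩
  | cons i rest ih =>
      intro req hnd
      cases hv : d.get? ("InventorySlot_" ++ PySem.Int.toStr i ++ "_item") with
      | none =>
          simp only [pvChkLoopA, hv]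
          rw [ih req hnd]
          have h1 : (∀ j ∈ i :: rest, pvVal d j ≠ some "rabbit_stew") ↔
              (∀ j ∈ rest, pvVal d j ≠ some "rabbit_stew") := by
            simp [pvVal, hv]
          have h2 : (∀ r ∈ req, ∃ j ∈ i :: rest, pvVal d j = some r) ↔
              (∀ r ∈ req, ∃ j ∈ rest, pvVal d j = some r) := by
            constructor
            · intro h r hr
              rcases h r hr with ⟨j, hj, hvj⟩
              rcases List.mem_cons.mp hj with rfl | hj'
              · simp [pvVal, hv] at hvj
              · exact ⟨j, hj', hvj⟩
            · intro h r hr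
              rcases h r hr with ⟨j, hj, hvj⟩
              exact ⟨j, List.mem_cons_of_mem _ hj, hvj⟩
          rw [decide_eq_decide.mpr h1.symm, decide_eq_decide.mpr h2.symm]
      | some item =>
          by_cases hstew : item = "rabbit_stew"
          · subst hstew
            simp only [pvChkLoopA, hv, BEq.rfl, if_true]
            have hfst : (decide (∀ j ∈ i :: rest, pvVal d j ≠ some "rabbit_stew")) = false := by
              simp only [decide_eq_false_iff_not]
              intro h
              exact h i List.mem_cons_self (by simp [pvVal, hv])
            rw [hfst, Bool.false_and]
          · have hbeq : (item == "rabbit_stew") = false := by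
              simp [hstew]
            simp only [pvChkLoopA, hv, hbeq, Bool.false_eq_true, if_false]
            have hreqe : (if req.contains item then (PySem.List.remove? req item).getD req else req)
                = if item ∈ req then req.erase item else req := by
              by_cases hm : item ∈ req
              · have h := PySem.List.remove?_eq_some_erase (xs := req) (v := item) hm
                simp [hm, h]
              · simp [hm]
            rw [hreqe]
            have hnd' : (if item ∈ req then req.erase item else req).Nodup := by
              split
              · exact hnd.erase item
              · exact hnd
            rw [ih _ hnd']
            have h1 : (∀ j ∈ rest, pvVal d j ≠ some "rabbit_stew") ↔
                (∀ j ∈ i :: rest, pvVal d j ≠ some "rabbit_stew") := by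
              constructor
              · intro h j hj
                rcases List.mem_cons.mp hj with rfl | hj'
                · simp only [pvVal, hv]
                  intro hcon
                  exact hstew (Option.some.inj hcon)
                · exact h j hj'
              · intro h j hj
                exact h j (List.mem_cons_of_mem _ hj)
            have h2 : (∀ r ∈ (if item ∈ req then req.erase item else req), ∃ j ∈ rest, pvVal d j = some r) ↔
                (∀ r ∈ req, ∃ j ∈ i :: rest, pvVal d j = some r) := by
              constructor
              · intro h r hr
                by_cases hri : r = item
                · exact ⟨i, List.mem_cons_self, by simp [pvVal, hv, hri]⟩
                · by_cases hm : item ∈ req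
                  · rcases h r (by simp [hm, hnd.mem_erase_iff, hri, hr]) with ⟨j, hj, hvj⟩
                    exact ⟨j, List.mem_cons_of_mem _ hj, hvj⟩
                  · rcases h r (by simp [hm, hr]) with ⟨j, hj, hvj⟩
                    exact ⟨j, List.mem_cons_of_mem _ hj, hvj⟩
              · intro h r hr
                have hrq : r ∈ req := by
                  by_cases hm : item ∈ req
                  · simp only [hm, if_true] at hr
                    exact ((hnd.mem_erase_iff).mp hr).2
                  · simpa [hm] using hr
                have hri : r ≠ item := by
                  by_cases hm : item ∈ req
                  · simp only [hm, if_true] at hr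
                    exact ((hnd.mem_erase_iff).mp hr).1
                  · intro hcon; subst hcon; exact hm hrq
                rcases h r hrq with ⟨j, hj, hvj⟩
                rcases List.mem_cons.mp hj with rfl | hj'
                · exfalso
                  rw [pvVal, hv] at hvj
                  exact hri (Option.some.inj hvj).symm
                · exact ⟨j, hj', hvj⟩
            rw [decide_eq_decide.mpr h1, decide_eq_decide.mpr h2]

-- membership in B's collected set
lemma pvMem_pvCollect_aux (d : PySem.Dict String String) :
    ∀ (idxs : List Int) (s : PySem.Set String) (x : String),
      (x ∈ idxs.foldl (fun s i =>
          let key := "InventorySlot_" ++ PySem.Int.toStr i ++ "_item"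
          match d.get? key with
          | some item => PySem.Set.add s item
          | none => s) s) ↔ (x ∈ s ∨ ∃ i ∈ idxs, pvVal d i = some x) := by
  intro idxs
  induction idxs with
  | nil => intro s x; simp
  | cons i rest ih =>
      intro s x
      rw [List.foldl_cons]
      cases hv : d.get? ("InventorySlot_" ++ PySem.Int.toStr i ++ "_item") with
      | none =>
          simp only [hv]
          rw [ih]
          constructor
          · rintro (hs | ⟨j, hj, hvj⟩)
            · exact Or.inl hs
            · exact Or.inr ⟨j, List.mem_cons_of_mem _ hj, hvj⟩
          · rintro (hs | ⟨j, hj, hvj⟩)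
            · exact Or.inl hs
            · rcases List.mem_cons.mp hj with rfl | hj'
              · rw [pvVal, hv] at hvj; cases hvj
              · exact Or.inr ⟨j, hj', hvj⟩
      | some item =>
          simp only [hv]
          rw [ih, PySem.Set.mem_add]
          constructor
          · rintro ((hs | hx) | ⟨j, hj, hvj⟩)
            · exact Or.inl hs
            · exact Or.inr ⟨i, List.mem_cons_self, by rw [pvVal, hv, hx]⟩
            · exact Or.inr ⟨j, List.mem_cons_of_mem _ hj, hvj⟩
          · rintro (hs | ⟨j, hj, hvj⟩)
            · exact Or.inl (Or.inl hs)
            · rcases List.mem_cons.mp hj with rfl | hj'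
              · rw [pvVal, hv] at hvj
                exact Or.inl (Or.inr (Option.some.inj hvj).symm)
              · exact Or.inr ⟨j, hj', hvj⟩

lemma pvContains_pvCollect (d : PySem.Dict String String) (idxs : List Int) (x : String) :
    PySem.Set.contains (pvCollect d idxs) x = decide (∃ i ∈ idxs, pvVal d i = some x) := by
  have h1 : PySem.Set.contains (pvCollect d idxs) x = decide (x ∈ pvCollect d idxs) := by
    simp [PySem.Set.contains]
  rw [h1]
  apply decide_eq_decide.mpr
  rw [pvCollect, pvMem_pvCollect_aux]
  simp [PySem.Set.empty]

-- ===== VERDICT (by name: the statement is the Claim_ definition above) =====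
theorem checkInventoryForStewIngredients_spec : Claim_equal_checkInventoryForStewIngredients := by
  intro obs _
  unfold Spec_checkInventoryForStewIngredients
  unfold checkInventoryForStewIngredients checkInventoryForStewIngredients_alt
  generalize PySem.Dict.mk obs = d
  rw [pvChkLoopA_char d _ _ (by decide)]
  simp only [List.all_cons, List.all_nil, Bool.and_true, pvContains_pvCollect]
  have hstew : (decide (∀ i ∈ PySem.List.pyRange 0 39 1, pvVal d i ≠ some "rabbit_stew")) =
      !(decide (∃ i ∈ PySem.List.pyRange 0 39 1, pvVal d i = some "rabbit_stew")) := by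
    rw [← decide_not]
    apply decide_eq_decide.mpr
    push Not
    exact Iff.rfl
  rw [hstew]
  congr 1
  simp only [List.forall_mem_cons, Bool.decide_and]
  simp
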